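-- pv_equiv track=rewrite | github.com/tony102741/firmware_project | src/core/analyzer/scoring.py | _classify_template_quality
-- ===== SOURCE A (Python) =====
-- _ERROR_PATH_INDICATORS = frozenset({
--     "error:", "warning:", "fatal:", "fail from ",
--     "failed in ", "cannot ", "failed to ",
--     "sigsegv", "sigbus", "dumping core",
--     "assertion ", "assert(", "catch(",
--     "exception:", "panic:",
-- })
--
-- _NORMAL_EXEC_INDICATORS = frozenset({
--     "iptables", "route ", "ifconfig ",
--     "echo ", "wget ", "curl ",
--     "nvram set", "uci set", "killall ",
--     "ping -", "chmod ", "mkdir ",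
--     "/bin/iptables", "/sbin/route",
--     ">> /var/", ">> /etc/",
-- })
--
-- def _classify_template_quality(templates):
--     """
--     Classify injection templates by execution-path certainty.
--
--     Returns 'direct'   — any template is on a normal execution path:
--                          shell command verb + format spec = attacker value
--                          is substituted in a genuinely reachable path.
--             'indirect' — all templates are in error/crash handler contexts:
--                          evidence is diagnostic noise, not a reachable attack
--                          path.
--             'none'     — no templates present.
--     """
--     if not templates:
--         return 'none'
--     direct   = 0
--     indirect = 0
--     for t in templates:
--         tl = t.lower()
--         if any(k in tl for k in _ERROR_PATH_INDICATORS):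
--             indirect += 1
--         elif any(k in tl for k in _NORMAL_EXEC_INDICATORS) or '%s' in t or '%d' in t:
--             direct += 1
--     if direct > 0:
--         return 'direct'
--     if indirect > 0:
--         return 'indirect'
--     return 'none'
-- ===== SOURCE B (Python) =====
-- _ERROR_PATH_INDICATORS = frozenset({
--     "error:", "warning:", "fatal:", "fail from ",
--     "failed in ", "cannot ", "failed to ",
--     "sigsegv", "sigbus", "dumping core",
--     "assertion ", "assert(", "catch(",
--     "exception:", "panic:",
-- })
--
-- _NORMAL_EXEC_INDICATORS = frozenset({
--     "iptables", "route ", "ifconfig ",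
--     "echo ", "wget ", "curl ",
--     "nvram set", "uci set", "killall ",
--     "ping -", "chmod ", "mkdir ",
--     "/bin/iptables", "/sbin/route",
--     ">> /var/", ">> /etc/",
-- })
--
--
-- def _in_error_context(t):
--     tl = t.lower()
--     return any(k in tl for k in _ERROR_PATH_INDICATORS)
--
--
-- def _is_direct(t):
--     if _in_error_context(t):
--         return False
--     tl = t.lower()
--     return any(k in tl for k in _NORMAL_EXEC_INDICATORS) or '%s' in t or '%d' in t
--
--
-- def _classify_template_quality(templates):
--     if not templates:
--         return 'none'
--     if any(_is_direct(t) for t in templates):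
--         return 'direct'
--     if any(_in_error_context(t) for t in templates):
--         return 'indirect'
--     return 'none'
-- ===== Notes on version B (the rewrite author's own statement) =====
-- stated objective: simpler
-- what changed: Replaces the counting pass with two named per-template predicates and short-circuiting any() existence scans, eliminating the counters entirely.
import Mathlib
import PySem

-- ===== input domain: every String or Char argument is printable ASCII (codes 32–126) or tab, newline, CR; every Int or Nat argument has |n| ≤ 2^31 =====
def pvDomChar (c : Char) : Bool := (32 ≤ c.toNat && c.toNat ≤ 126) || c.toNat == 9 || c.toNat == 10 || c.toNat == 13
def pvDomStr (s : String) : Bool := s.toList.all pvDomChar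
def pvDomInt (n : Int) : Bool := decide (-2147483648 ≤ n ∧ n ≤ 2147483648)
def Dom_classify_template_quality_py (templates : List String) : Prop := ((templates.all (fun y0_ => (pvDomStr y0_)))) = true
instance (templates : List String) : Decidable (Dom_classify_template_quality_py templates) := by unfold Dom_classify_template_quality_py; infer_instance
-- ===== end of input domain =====

-- B replaces A's counting loop with two named per-template predicates and short-circuit existence scans (objective: simpler); same return value everywhere.

-- ===== PORT A =====
-- membership order of a frozenset is irrelevant under any(); listed in source order
def pvErrorPathIndicators : List String :=
  ["error:", "warning:", "fatal:", "fail from ",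
   "failed in ", "cannot ", "failed to ",
   "sigsegv", "sigbus", "dumping core",
   "assertion ", "assert(", "catch(",
   "exception:", "panic:"]

def pvNormalExecIndicators : List String :=
  ["iptables", "route ", "ifconfig ",
   "echo ", "wget ", "curl ",
   "nvram set", "uci set", "killall ",
   "ping -", "chmod ", "mkdir ",
   "/bin/iptables", "/sbin/route",
   ">> /var/", ">> /etc/"]

def pvStepA (acc : Nat × Nat) (t : String) : Nat × Nat :=
  let tl := PySem.Str.lower t
  if pvErrorPathIndicators.any (fun k => PySem.Str.isIn k tl) then
    (acc.1, acc.2 + 1)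
  else if pvNormalExecIndicators.any (fun k => PySem.Str.isIn k tl)
          || PySem.Str.isIn "%s" t || PySem.Str.isIn "%d" t then
    (acc.1 + 1, acc.2)
  else acc

def classify_template_quality_py (templates : List String) : String :=
  if templates.isEmpty then "none"
  else
    let counts : Nat × Nat := templates.foldl pvStepA (0, 0)
    if counts.1 > 0 then "direct"
    else if counts.2 > 0 then "indirect"
    else "none"

-- ===== PORT B =====
def pvInErrorContext (t : String) : Bool :=
  pvErrorPathIndicators.any (fun k => PySem.Str.isIn k (PySem.Str.lower t))

def pvIsDirect (t : String) : Bool :=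
  if pvInErrorContext t then false
  else pvNormalExecIndicators.any (fun k => PySem.Str.isIn k (PySem.Str.lower t))
       || PySem.Str.isIn "%s" t || PySem.Str.isIn "%d" t

def classify_template_quality_py_alt (templates : List String) : String :=
  if templates.isEmpty then "none"
  else if templates.any pvIsDirect then "direct"
  else if templates.any pvInErrorContext then "indirect"
  else "none"

-- ===== PRECONDITION & SPEC =====
def Spec_classify_template_quality_py (templates : List String) (out : String) : Prop := out = classify_template_quality_py_alt templates
instance (templates : List String) (out : String) : Decidable (Spec_classify_template_quality_py templates out) := by unfold Spec_classify_template_quality_py; infer_instance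

-- ===== CLAIM (what is proved, stated in full; the proofs are below) =====
def Claim_equal_classify_template_quality_py : Prop := ∀ (templates : List String), Dom_classify_template_quality_py templates → Spec_classify_template_quality_py templates (classify_template_quality_py templates)

-- ===== LEMMAS AND PROOFS =====

theorem pvStepA_eq (acc : Nat × Nat) (t : String) :
    pvStepA acc t = (acc.1 + (if pvIsDirect t then 1 else 0),
                     acc.2 + (if pvInErrorContext t then 1 else 0)) := by
  unfold pvStepA pvIsDirect pvInErrorContext
  cases he : pvErrorPathIndicators.any (fun k => PySem.Str.isIn k (PySem.Str.lower t)) with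
  | false =>
    cases hd : (pvNormalExecIndicators.any (fun k => PySem.Str.isIn k (PySem.Str.lower t))
        || PySem.Str.isIn "%s" t || PySem.Str.isIn "%d" t) with
    | false => simp only [he, hd]; simp
    | true => simp only [he, hd]; simp
  | true => simp only [he]; simp

-- A's fold counts exactly the templates satisfying B's two predicates
theorem pv_fold_counts (l : List String) (acc : Nat × Nat) :
    l.foldl pvStepA acc
      = (acc.1 + l.countP (fun t => pvIsDirect t),
         acc.2 + l.countP (fun t => pvInErrorContext t)) := by
  induction l generalizing acc with
  | nil => simp
  | cons t rest ih =>
    simp only [List.foldl_cons, List.countP_cons, ih, pvStepA_eq]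
    refine Prod.ext ?_ ?_ <;> simp <;> omega

theorem pv_countP_pos_iff_any (l : List String) (p : String → Bool) :
    (0 < l.countP (fun t => p t)) ↔ l.any p = true := by
  induction l with
  | nil => simp
  | cons t rest ih =>
    simp only [List.countP_cons, List.any_cons, Bool.or_eq_true, ← ih]
    cases p t <;> simp

theorem pv_agree (templates : List String) :
    classify_template_quality_py templates = classify_template_quality_py_alt templates := by
  unfold classify_template_quality_py classify_template_quality_py_alt
  by_cases hemp : templates.isEmpty
  · simp [hemp]
  · simp only [hemp]
    rw [pv_fold_counts]
    simp only [Nat.zero_add]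
    by_cases hd : templates.any pvIsDirect
    · have h1 : 0 < templates.countP (fun t => pvIsDirect t) :=
        (pv_countP_pos_iff_any templates pvIsDirect).mpr hd
      simp [hd, h1]
    · have h0 : ¬ 0 < templates.countP (fun t => pvIsDirect t) := by
        rw [pv_countP_pos_iff_any]; exact hd
      by_cases he : templates.any pvInErrorContext
      · have h1 : 0 < templates.countP (fun t => pvInErrorContext t) :=
          (pv_countP_pos_iff_any templates pvInErrorContext).mpr he
        simp [hd, he, h0, h1]
      · have h1 : ¬ 0 < templates.countP (fun t => pvInErrorContext t) := by
          rw [pv_countP_pos_iff_any]; exact he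
        simp [hd, he, h0, h1]

-- ===== VERDICT (by name: the statement is the Claim_ definition above) =====
theorem classify_template_quality_py_spec : Claim_equal_classify_template_quality_py := by
  intro templates _
  unfold Spec_classify_template_quality_py
  exact pv_agree templates
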